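-- pv_equiv track=rewrite | github.com/suic86/adventofcode | 2016/day_07/solution.py | split_address
-- ===== SOURCE A (Python) =====
-- def split_address(address: str) -> tuple[list[str], list[str]]:
--     outer: list[str] = []
--     inner: list[str] = []
--     buffer: list[str] = []
--     inside = False
--     for c in address:
--         if c not in "[]":
--             buffer.append(c)
--             continue
--         if c == "[":
--             if inside:
--                 raise ValueError("Invalid address.")
--             outer.append("".join(buffer))
--             inside = True
--         elif c == "]":
--             if not inside:
--                 raise ValueError("Invalid address.")
--             inner.append("".join(buffer))
--             inside = False
--         buffer = []
--     if inside:
--         raise ValueError("Invalid address.")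
--     if buffer:
--         outer.append("".join(buffer))
--     return outer, inner
-- ===== SOURCE B (Python) =====
-- def split_address(address):
--     pieces = address.split('[')
--     if ']' in pieces[0]:
--         raise ValueError('Invalid address.')
--     outer = [pieces[0]]
--     inner = []
--     for piece in pieces[1:]:
--         if piece.count(']') != 1:
--             raise ValueError('Invalid address.')
--         ins, out = piece.split(']')
--         inner.append(ins)
--         outer.append(out)
--     if outer[-1] == '':
--         outer.pop()
--     return outer, inner
-- ===== Notes on version B (the rewrite author's own statement) =====
-- stated objective: idiomatic
-- what changed: B replaces A's character-by-character state machine (buffer + inside flag) by splitting the address on '[' and splitting each later piece once on ']', so segments are taken whole (C-level str.split) instead of being accumulated one character at a time.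
-- outside the precondition, e.g. on split_address('['): A raises ValueError, B raises ValueError; on split_address(']'): A raises ValueError, B raises ValueError
import Mathlib
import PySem

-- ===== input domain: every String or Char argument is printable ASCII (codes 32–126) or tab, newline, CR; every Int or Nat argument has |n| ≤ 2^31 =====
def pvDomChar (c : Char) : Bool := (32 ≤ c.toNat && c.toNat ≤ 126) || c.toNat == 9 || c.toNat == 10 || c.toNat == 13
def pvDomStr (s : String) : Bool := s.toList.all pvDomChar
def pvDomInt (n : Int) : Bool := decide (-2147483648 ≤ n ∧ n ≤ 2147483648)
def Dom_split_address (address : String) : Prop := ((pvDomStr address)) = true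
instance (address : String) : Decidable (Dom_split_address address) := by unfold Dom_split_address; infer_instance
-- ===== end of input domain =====

-- B replaces A's character-by-character state machine by split('[') / split(']') segment
-- processing (objective: idiomatic); on inputs where A raises ValueError both raise (excluded by Pre_).

-- ===== PORT A =====
-- state machine of A as structural recursion over the characters;
-- ''.join(buffer) over the accumulated character list is String.ofList; 'raise ValueError' = none
def goA : List Char → List String → List String → List Char → Bool → Option (List String × List String)
  | [], outer, inner, buffer, inside =>
      if inside then none
      else if buffer.isEmpty then some (outer, inner)
      else some (outer ++ [String.ofList buffer], inner)
  | c :: rest, outer, inner, buffer, inside =>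
      if !(c == '[' || c == ']') then goA rest outer inner (buffer ++ [c]) inside
      else if c == '[' then
        if inside then none
        else goA rest (outer ++ [String.ofList buffer]) inner [] true
      else
        if !inside then none
        else goA rest outer (inner ++ [String.ofList buffer]) [] false

def split_address (address : String) : List String × List String :=
  (goA address.toList [] [] [] false).getD ([], [])   -- the none (ValueError) path is outside Pre_

-- ===== PORT B =====
-- Source B's trailing 'if outer[-1] == "": outer.pop()'
def popEmptyLast (outer : List String) : List String :=
  if outer.getLast? == some "" then outer.dropLast else outer

-- Source B's loop over pieces[1:]; 'raise ValueError' = none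
def goB : List String → List String → List String → Option (List String × List String)
  | [], outer, inner => some (outer, inner)
  | piece :: rest, outer, inner =>
      if PySem.Str.count piece "]" ≠ 1 then none
      else
        match PySem.Str.split? piece "]" with
        | some [ins, out] => goB rest (outer ++ [out]) (inner ++ [ins])
        | _ => none

def split_address_alt (address : String) : List String × List String :=
  match PySem.Str.split? address "[" with
  | some (p0 :: rest) =>
      if PySem.Str.isIn "]" p0 then ([], [])          -- ValueError path, outside Pre_
      else
        match goB rest [p0] [] with
        | some (outer, inner) => (popEmptyLast outer, inner)
        | none => ([], [])                            -- ValueError path, outside Pre_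
  | _ => ([], [])                                     -- unreachable: split('[') yields ≥ 1 piece

-- ===== PRECONDITION & SPEC =====
def isBr (c : Char) : Bool := c == '[' || c == ']'

-- the bracket characters of the address must read "[]" repeated (balanced, unnested, closed)
def altOK : List Char → Bool
  | [] => true
  | [_] => false
  | b₁ :: b₂ :: rest => b₁ = '[' && b₂ = ']' && altOK rest

-- Pre_ excludes exactly the addresses with ill-formed brackets, on which A raises ValueError (B raises too)
def Pre_split_address (address : String) : Prop :=
  altOK (address.toList.filter isBr) = true
instance (address : String) : Decidable (Pre_split_address address) := by
  unfold Pre_split_address; infer_instance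

def pvWitness_split_address : String := "ab[cd]ef[g]"

def Spec_split_address (address : String) (out : List String × List String) : Prop :=
  out = split_address_alt address
instance (address : String) (out : List String × List String) : Decidable (Spec_split_address address out) := by
  unfold Spec_split_address; infer_instance

-- ===== CLAIM (what is proved, stated in full; the proofs are below) =====
def Claim_equal_split_address : Prop :=
  ∀ (address : String), Dom_split_address address → Pre_split_address address →
    Spec_split_address address (split_address address)

-- ===== LEMMAS AND PROOFS =====

-- reference single-character splitter: sp sep l = the pieces of l between occurrences of sep
def sp (sep : Char) : List Char → List (List Char)
  | [] => [[]]
  | c :: rest =>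
      if c = sep then [] :: sp sep rest
      else
        match sp sep rest with
        | [] => [[c]]
        | h :: t => (c :: h) :: t

theorem sp_ne_nil (sep : Char) (l : List Char) : sp sep l ≠ [] := by
  cases l with
  | nil => simp [sp]
  | cons c rest =>
    simp only [sp]
    split
    · simp
    · split <;> simp

theorem modifyHead_id (xs : List (List Char)) :
    xs.modifyHead (fun h => h) = xs := by
  cases xs <;> simp

theorem splitOn_go_single (sep : Char) :
    ∀ (fuel : Nat) (l cur : List Char) (acc : List (List Char)), l.length ≤ fuel →
      PySem.Chars.splitOn.go [sep] fuel l cur acc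
        = acc.reverse ++ (sp sep l).modifyHead (fun h => cur.reverse ++ h) := by
  intro fuel
  induction fuel with
  | zero =>
    intro l cur acc hl
    have : l = [] := List.eq_nil_of_length_eq_zero (Nat.le_zero.mp hl)
    subst this
    simp [PySem.Chars.splitOn.go, sp]
  | succ n ih =>
    intro l cur acc hl
    cases l with
    | nil => simp [PySem.Chars.splitOn.go, sp]
    | cons c rest =>
      by_cases hc : c = sep
      · subst hc
        have hpre : List.isPrefixOf [c] (c :: rest) = true := by
          simp [List.isPrefixOf]
        rw [PySem.Chars.splitOn.go]
        simp only [hpre, if_true, List.length_cons, List.length_nil, List.drop_succ_cons,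
          List.drop_zero]
        rw [ih rest [] (cur.reverse :: acc) (by simpa using Nat.lt_succ_iff.mp (by simpa using hl))]
        simp [sp, modifyHead_id]
      · have hpre : List.isPrefixOf [sep] (c :: rest) = false := by
          simp [List.isPrefixOf, beq_eq_false_iff_ne]
          exact fun h => hc h.symm
        rw [PySem.Chars.splitOn.go]
        simp only [hpre]
        rw [ih rest (c :: cur) acc (by simpa using Nat.lt_succ_iff.mp (by simpa using hl))]
        have hne := sp_ne_nil sep rest
        simp only [sp, if_neg hc]
        cases hsp : sp sep rest with
        | nil => exact absurd hsp hne
        | cons h t => simp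

theorem splitOn_single (sep : Char) (l : List Char) :
    PySem.Chars.splitOn l [sep] = sp sep l := by
  unfold PySem.Chars.splitOn
  rw [splitOn_go_single sep (l.length + 1) l [] [] (Nat.le_succ _)]
  simp [modifyHead_id]

theorem count_go_single (c : Char) :
    ∀ (fuel : Nat) (l : List Char) (acc : Nat), l.length ≤ fuel →
      PySem.Chars.count.go [c] fuel l acc = acc + l.count c := by
  intro fuel
  induction fuel with
  | zero =>
    intro l acc hl
    have : l = [] := List.eq_nil_of_length_eq_zero (Nat.le_zero.mp hl)
    subst this
    simp [PySem.Chars.count.go]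
  | succ n ih =>
    intro l acc hl
    cases l with
    | nil => simp [PySem.Chars.count.go]
    | cons d rest =>
      have hrest : rest.length ≤ n := by simpa using Nat.lt_succ_iff.mp (by simpa using hl)
      by_cases hd : d = c
      · subst hd
        have hpre : List.isPrefixOf [d] (d :: rest) = true := by simp [List.isPrefixOf]
        rw [PySem.Chars.count.go]
        simp only [hpre, if_true, List.length_cons, List.length_nil, List.drop_succ_cons,
          List.drop_zero]
        rw [ih rest (acc + 1) hrest]
        simp [List.count_cons_self]
        omega
      · have hpre : List.isPrefixOf [c] (d :: rest) = false := by
          simp [List.isPrefixOf, beq_eq_false_iff_ne]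
          exact fun h => hd h.symm
        rw [PySem.Chars.count.go]
        simp only [hpre]
        rw [ih rest acc hrest]
        simp [List.count_cons_of_ne (by exact fun h => hd h)]

theorem count_single (l : List Char) (c : Char) :
    PySem.Chars.count l [c] = l.count c := by
  unfold PySem.Chars.count
  simp only [List.isEmpty_cons, if_false, Bool.false_eq_true]
  simpa using count_go_single c l.length l 0 (le_refl _)

theorem sp_of_not_mem {sep : Char} {l : List Char} (h : sep ∉ l) : sp sep l = [l] := by
  induction l with
  | nil => simp [sp]
  | cons c rest ih =>
    have hc : c ≠ sep := fun hh => h (hh ▸ List.mem_cons_self)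
    have hr : sep ∉ rest := fun hh => h (List.mem_cons_of_mem _ hh)
    simp [sp, hc, ih hr]

theorem sp_append_of_not_mem {sep : Char} {x : List Char} (y : List Char) (h : sep ∉ x) :
    sp sep (x ++ y) = (sp sep y).modifyHead (fun hd => x ++ hd) := by
  induction x with
  | nil => simp [modifyHead_id]
  | cons c rest ih =>
    have hc : c ≠ sep := fun hh => h (hh ▸ List.mem_cons_self)
    have hr : sep ∉ rest := fun hh => h (List.mem_cons_of_mem _ hh)
    have hne := sp_ne_nil sep y
    cases hsp : sp sep y with
    | nil => exact absurd hsp hne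
    | cons hd t =>
      have := ih hr
      rw [hsp] at this
      simp only [List.cons_append, sp, if_neg hc, this]
      simp

theorem sp_head_decomp (sep : Char) (l : List Char) :
    ∃ t', l = (sp sep l).headI ++ t' ∧ sep ∉ (sp sep l).headI := by
  induction l with
  | nil => exact ⟨[], by simp [sp]⟩
  | cons c rest ih =>
    by_cases hc : c = sep
    · subst hc
      exact ⟨c :: rest, by simp [sp]⟩
    · obtain ⟨t', ht, hmem⟩ := ih
      have hne := sp_ne_nil sep rest
      cases hsp : sp sep rest with
      | nil => exact absurd hsp hne
      | cons h t =>
        rw [hsp] at ht hmem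
        refine ⟨t', ?_, ?_⟩
        · simp only [sp, if_neg hc, hsp]
          simpa using ht
        · simp only [sp, if_neg hc, hsp]
          simp only [List.headI] at hmem ⊢
          intro hh
          rcases List.mem_cons.mp hh with h1 | h1
          · exact hc h1.symm
          · exact hmem h1

theorem altOK_cons {b : Char} {bs : List Char} (h : altOK (b :: bs) = true) :
    b = '[' ∧ ∃ bs', bs = ']' :: bs' ∧ altOK bs' = true := by
  cases bs with
  | nil => simp [altOK] at h
  | cons b2 r =>
    simp only [altOK, Bool.and_eq_true, decide_eq_true_eq] at h
    exact ⟨h.1.1, r, by rw [h.1.2], h.2⟩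

theorem head_no_close {l : List Char} (hpre : altOK (l.filter isBr) = true) :
    ']' ∉ (sp '[' l).headI := by
  intro hmem
  obtain ⟨t', hl, hno⟩ := sp_head_decomp '[' l
  obtain ⟨a, b, hab⟩ := List.append_of_mem hmem
  have hlab : l = a ++ ']' :: (b ++ t') := by rw [hl, hab]; simp
  have hfil : l.filter isBr = a.filter isBr ++ ']' :: (b ++ t').filter isBr := by
    rw [hlab]; simp [isBr]
  have hall : ∀ d ∈ a.filter isBr, d = ']' := by
    intro d hd
    have hda : d ∈ a := List.mem_of_mem_filter hd
    have hdh : d ∈ (sp '[' l).headI := by rw [hab]; exact List.mem_append_left _ hda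
    have hbr : isBr d = true := List.of_mem_filter hd
    simp only [isBr, Bool.or_eq_true, beq_iff_eq] at hbr
    rcases hbr with h1 | h1
    · exact absurd (h1 ▸ hdh) hno
    · exact h1
  rw [hfil] at hpre
  cases hfa : a.filter isBr with
  | nil =>
    rw [hfa] at hpre
    simp only [List.nil_append] at hpre
    have := (altOK_cons hpre).1
    simp at this
  | cons d ds =>
    rw [hfa] at hpre
    have hd : d = ']' := hall d (by rw [hfa]; exact List.mem_cons_self)
    rw [hd] at hpre
    have := (altOK_cons hpre).1
    simp at this

theorem pre_decomp {l : List Char} (hpre : altOK (l.filter isBr) = true) :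
    (∀ c ∈ l, isBr c = false) ∨
    ∃ o i rest, l = o ++ '[' :: (i ++ ']' :: rest) ∧
      (∀ c ∈ o, isBr c = false) ∧ (∀ c ∈ i, isBr c = false) ∧
      altOK (rest.filter isBr) = true := by
  cases hf : l.filter isBr with
  | nil =>
    left
    intro c hc
    by_contra hb
    have : c ∈ l.filter isBr := List.mem_filter.mpr ⟨hc, by simpa using hb⟩
    rw [hf] at this
    simp at this
  | cons b bs =>
    right
    rw [hf] at hpre
    obtain ⟨hb, bs', hbs, hok⟩ := altOK_cons hpre
    subst hb hbs
    obtain ⟨l₁, l₂, hl, ho1, _, hf2⟩ := List.filter_eq_cons_iff.mp hf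
    obtain ⟨l₃, l₄, hl2, hi1, _, hf4⟩ := List.filter_eq_cons_iff.mp hf2
    refine ⟨l₁, l₃, l₄, ?_, ?_, ?_, ?_⟩
    · rw [hl, hl2]
    · intro c hc; simpa using ho1 c hc
    · intro c hc; simpa using hi1 c hc
    · rw [hf4]; exact hok

theorem goA_skip (m : List Char) (hm : ∀ c ∈ m, isBr c = false) :
    ∀ (t : List Char) (outer inner : List String) (buffer : List Char) (inside : Bool),
      goA (m ++ t) outer inner buffer inside = goA t outer inner (buffer ++ m) inside := by
  induction m with
  | nil => intro t outer inner buffer inside; simp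
  | cons c rest ih =>
    intro t outer inner buffer inside
    have hc : isBr c = false := hm c List.mem_cons_self
    have hrest : ∀ d ∈ rest, isBr d = false := fun d hd => hm d (List.mem_cons_of_mem _ hd)
    simp only [List.cons_append, goA]
    simp only [isBr] at hc
    rw [if_pos (by simp [hc])]
    rw [ih hrest]
    simp

theorem popEmptyLast_cons {a : String} {xs : List String} (h : xs ≠ []) :
    popEmptyLast (a :: xs) = a :: popEmptyLast xs := by
  unfold popEmptyLast
  cases xs with
  | nil => exact absurd rfl h
  | cons b t =>
    rw [List.getLast?_cons_cons]
    split <;> simp [List.dropLast]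

theorem ofList_eq_empty_iff (l : List Char) : (String.ofList l = "") ↔ l = [] := by
  constructor
  · intro h
    have := congrArg String.toList h
    simpa using this
  · intro h; subst h; rfl

-- the bracket-free case of the main invariant
theorem main_free {l : List Char} (hfree : ∀ c ∈ l, isBr c = false) :
    (∀ outer inner, goA l outer inner [] false
        = some (outer ++ popEmptyLast [String.ofList l], inner)) ∧
    (∀ outer inner, goB ((sp '[' l).tail.map String.ofList)
        (outer ++ [String.ofList (sp '[' l).headI]) inner
        = some (outer ++ [String.ofList l], inner)) := by
  have hnolb : '[' ∉ l := by
    intro hh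
    have := hfree '[' hh
    simp [isBr] at this
  have hsp : sp '[' l = [l] := sp_of_not_mem hnolb
  constructor
  · intro outer inner
    have := goA_skip l hfree [] outer inner [] false
    rw [show l ++ [] = l by simp] at this
    rw [this]
    by_cases hl : l = []
    · subst hl
      simp [goA, popEmptyLast]
    · simp only [goA, if_false, Bool.false_eq_true, List.nil_append]
      rw [if_neg (by simpa using hl)]
      unfold popEmptyLast
      have : (List.getLast? [String.ofList l] == some "") = false := by
        simp only [List.getLast?_singleton, beq_eq_false_iff_ne, ne_eq, Option.some_inj]
        rw [ofList_eq_empty_iff]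
        exact hl
      rw [this]
      simp
  · intro outer inner
    rw [hsp]
    simp [goB]

theorem main : ∀ (n : Nat) (l : List Char), l.length ≤ n → altOK (l.filter isBr) = true →
    ∃ xs ys : List String, xs ≠ [] ∧
      (∀ outer inner, goA l outer inner [] false
          = some (outer ++ popEmptyLast xs, inner ++ ys)) ∧
      (∀ outer inner, goB ((sp '[' l).tail.map String.ofList)
          (outer ++ [String.ofList (sp '[' l).headI]) inner
          = some (outer ++ xs, inner ++ ys)) := by
  intro n
  induction n with
  | zero =>
    intro l hl hpre
    have : l = [] := List.eq_nil_of_length_eq_zero (Nat.le_zero.mp hl)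
    subst this
    obtain ⟨hA, hB⟩ := main_free (l := []) (by simp)
    exact ⟨[String.ofList []], [], by simp, by simpa using hA, by simpa using hB⟩
  | succ n ih =>
    intro l hl hpre
    rcases pre_decomp hpre with hfree | ⟨o, i, rest, hdec, ho, hi, hrest⟩
    · obtain ⟨hA, hB⟩ := main_free hfree
      exact ⟨[String.ofList l], [], by simp, by simpa using hA, by simpa using hB⟩
    · subst hdec
      have hrl : rest.length ≤ n := by
        simp only [List.length_append, List.length_cons] at hl
        omega
      obtain ⟨xs', ys', hne', hA', hB'⟩ := ih rest hrl hrest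
      -- facts about the pieces
      have hnoLo : '[' ∉ o := fun hh => by have := ho '[' hh; simp [isBr] at this
      have hnoRo : ']' ∉ o := fun hh => by have := ho ']' hh; simp [isBr] at this
      have hnoLi : '[' ∉ i := fun hh => by have := hi '[' hh; simp [isBr] at this
      have hnoRi : ']' ∉ i := fun hh => by have := hi ']' hh; simp [isBr] at this
      have hneRest := sp_ne_nil '[' rest
      obtain ⟨h, t, hsprest⟩ : ∃ h t, sp '[' rest = h :: t := by
        cases hc : sp '[' rest with
        | nil => exact absurd hc hneRest
        | cons a b => exact ⟨a, b, rfl⟩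
      have hnoRh : ']' ∉ h := by
        have := head_no_close hrest
        rw [hsprest] at this
        simpa using this
      -- shape of sp '[' l
      have hspu : sp '[' (i ++ ']' :: rest) = (i ++ ']' :: h) :: t := by
        have h1 : sp '[' (']' :: rest) = (']' :: h) :: t := by
          simp [sp, hsprest]
        have h2 := sp_append_of_not_mem (sep := '[') (']' :: rest) hnoLi
        rw [h1] at h2
        simpa using h2
      have hspl : sp '[' (o ++ '[' :: (i ++ ']' :: rest)) = o :: (i ++ ']' :: h) :: t := by
        have h1 : sp '[' ('[' :: (i ++ ']' :: rest)) = [] :: (i ++ ']' :: h) :: t := by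
          simp [sp, hspu]
        have h2 := sp_append_of_not_mem (sep := '[') ('[' :: (i ++ ']' :: rest)) hnoLo
        rw [h1] at h2
        simpa using h2
      refine ⟨String.ofList o :: xs', String.ofList i :: ys', by simp, ?_, ?_⟩
      · -- A side
        intro outer inner
        rw [goA_skip o ho]
        simp only [goA, List.nil_append]
        rw [if_neg (by simp), if_pos (by simp), if_neg (by simp)]
        rw [goA_skip i hi]
        simp only [goA, List.nil_append]
        rw [if_neg (by simp), if_neg (by simp), if_neg (by simp)]
        rw [hA' (outer ++ [String.ofList o]) (inner ++ [String.ofList i])]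
        rw [popEmptyLast_cons hne']
        simp
      · -- B side
        intro outer inner
        rw [hspl]
        simp only [List.headI, List.tail_cons, List.map_cons]
        have hcount : PySem.Str.count (String.ofList (i ++ ']' :: h)) "]" = 1 := by
          rw [PySem.Str.count_eq]
          simp only [String.toList_ofList]
          rw [show ("]" : String).toList = [']'] from rfl]
          rw [count_single]
          rw [List.count_append, List.count_cons_self]
          rw [List.count_eq_zero.mpr hnoRi, List.count_eq_zero.mpr hnoRh]
        have hsplit : PySem.Str.split? (String.ofList (i ++ ']' :: h)) "]"
            = some [String.ofList i, String.ofList h] := by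
          unfold PySem.Str.split?
          simp only [String.toList_ofList]
          rw [show ("]" : String).toList = [']'] from rfl]
          unfold PySem.Chars.split?
          rw [if_neg (by simp)]
          rw [splitOn_single]
          have h1 : sp ']' (']' :: h) = [] :: [h] := by
            simp [sp, sp_of_not_mem hnoRh]
          have h2 := sp_append_of_not_mem (sep := ']') (']' :: h) hnoRi
          rw [h1] at h2
          simp only [List.modifyHead, List.append_nil] at h2
          rw [h2]
          simp
        simp only [goB, hcount]
        rw [if_neg (by simp)]
        rw [hsplit]
        show goB (List.map String.ofList t)
            ((outer ++ [String.ofList o]) ++ [String.ofList h]) (inner ++ [String.ofList i])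
          = some (outer ++ String.ofList o :: xs', inner ++ String.ofList i :: ys')
        have := hB' (outer ++ [String.ofList o]) (inner ++ [String.ofList i])
        rw [hsprest] at this
        simp only [List.headI, List.tail_cons] at this
        rw [show (outer ++ [String.ofList o]) ++ [String.ofList h]
              = outer ++ [String.ofList o] ++ [String.ofList h] by simp] at this
        rw [this]
        simp

-- ===== VERDICT (by name: the statement is the Claim_ definition above) =====
theorem split_address_spec : Claim_equal_split_address := by
  unfold Claim_equal_split_address
  intro address _ hpre
  unfold Spec_split_address
  unfold Pre_split_address at hpre
  obtain ⟨xs, ys, hne, hA, hB⟩ := main address.toList.length address.toList (le_refl _) hpre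
  have hAres : split_address address = (popEmptyLast xs, ys) := by
    unfold split_address
    rw [hA [] []]
    simp
  have hsplit : PySem.Str.split? address "["
      = some ((sp '[' address.toList).map String.ofList) := by
    unfold PySem.Str.split?
    rw [show ("[" : String).toList = ['['] from rfl]
    unfold PySem.Chars.split?
    rw [if_neg (by simp)]
    rw [splitOn_single]
    rfl
  obtain ⟨q, qs, hq⟩ : ∃ q qs, sp '[' address.toList = q :: qs := by
    cases hc : sp '[' address.toList with
    | nil => exact absurd hc (sp_ne_nil _ _)
    | cons a b => exact ⟨a, b, rfl⟩
  have hnoRq : ']' ∉ q := by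
    have := head_no_close hpre
    rw [hq] at this
    simpa using this
  have hisin : PySem.Str.isIn "]" (String.ofList q) = false := by
    rw [Bool.eq_false_iff]
    intro hh
    have hinf := (PySem.Str.isIn_iff_infix _ _).1 hh
    rw [show ("]" : String).toList = [']'] from rfl] at hinf
    simp only [String.toList_ofList] at hinf
    exact hnoRq (hinf.mem (by simp : (']' : Char) ∈ [']']))
  have hBres := hB [] []
  rw [hq] at hBres
  simp only [List.headI, List.tail_cons, List.nil_append] at hBres
  rw [hAres]
  unfold split_address_alt
  rw [hsplit, hq]
  simp only [List.map_cons]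
  rw [hisin]
  simp only [Bool.false_eq_true, if_false]
  rw [hBres]
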